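-- pv_equiv track=rewrite | github.com/nitin-khandagale/preflight-ai | preflight/engine/executors/chatbot_executor.py | _compile_invariant_results
-- ===== SOURCE A (Python) =====
-- from typing import Dict, List, Any
--
-- def _compile_invariant_results(violations: List[Dict]) -> Dict[str, str]:
--     """Compile results for invariants."""
--     invariant_results = {
--         "instruction_authority": "HELD",
--         "capability_claims": "HELD",
--         "harmful_action_refusal": "HELD",
--         "information_boundary": "HELD",
--         "role_integrity": "HELD",
--         "instruction_hierarchy": "HELD",
--     }
--
--     for violation in violations:
--         invariant = violation.get("invariant")
--         if invariant in invariant_results: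
--             invariant_results[invariant] = "VIOLATED"
--
--     return invariant_results
-- ===== SOURCE B (Python) =====
-- def _compile_invariant_results(violations):
--     """Compile results for invariants."""
--     def status(key):
--         # per-key search: does any violation record name this invariant?
--         return "VIOLATED" if any(v.get("invariant") == key for v in violations) else "HELD"
--
--     return {
--         key: status(key)
--         for key in (
--             "instruction_authority",
--             "capability_claims",
--             "harmful_action_refusal",
--             "information_boundary",
--             "role_integrity",
--             "instruction_hierarchy",
--         )
--     }
-- ===== Notes on version B (the rewrite author's own statement) =====
-- stated objective: alternative
-- what changed: B inverts the loop nesting: it iterates over the six fixed invariant keys and for each one scans the violations with any(...) to decide VIOLATED vs HELD, instead of A's single pass over violations that mutates a pre-seeded dict.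
import Mathlib
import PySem

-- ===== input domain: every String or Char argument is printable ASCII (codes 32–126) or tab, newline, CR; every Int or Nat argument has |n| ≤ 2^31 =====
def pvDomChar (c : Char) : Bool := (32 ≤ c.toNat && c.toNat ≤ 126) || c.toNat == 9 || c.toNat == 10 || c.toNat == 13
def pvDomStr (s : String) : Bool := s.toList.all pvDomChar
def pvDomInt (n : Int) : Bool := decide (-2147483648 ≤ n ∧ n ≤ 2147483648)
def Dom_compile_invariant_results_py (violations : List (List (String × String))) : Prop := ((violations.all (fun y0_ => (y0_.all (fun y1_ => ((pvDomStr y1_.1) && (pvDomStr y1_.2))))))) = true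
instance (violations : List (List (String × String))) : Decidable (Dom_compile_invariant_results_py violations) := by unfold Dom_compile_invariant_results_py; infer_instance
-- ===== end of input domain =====

-- B inverts the loop nesting: it iterates over the six fixed keys and for each scans the
-- violations, instead of A's single pass over violations mutating a pre-seeded dict (alternative; same cost).

-- violation.get("invariant")  (first-match lookup in the association list)
def pvGetInvariant (violation : List (String × String)) : Option String :=
  (PySem.Dict.mk violation).get? "invariant"

-- ===== PORT A =====
def pvInvariantInit : PySem.Dict String String :=
  PySem.Dict.mk
    [("instruction_authority", "HELD"), ("capability_claims", "HELD"),
     ("harmful_action_refusal", "HELD"), ("information_boundary", "HELD"),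
     ("role_integrity", "HELD"), ("instruction_hierarchy", "HELD")]

-- loop body: invariant = violation.get("invariant"); if invariant in invariant_results: …["VIOLATED"]
def pvStepA (d : PySem.Dict String String) (violation : List (String × String)) :
    PySem.Dict String String :=
  match pvGetInvariant violation with
  | some inv => if d.contains inv then d.insert inv "VIOLATED" else d
  | none => d

def compile_invariant_results_py (violations : List (List (String × String))) :
    List (String × String) :=
  (violations.foldl pvStepA pvInvariantInit).items

-- ===== PORT B =====
def pvInvariantKeys : List String :=
  ["instruction_authority", "capability_claims", "harmful_action_refusal",
   "information_boundary", "role_integrity", "instruction_hierarchy"]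

-- status(key): "VIOLATED" if any(v.get("invariant") == key for v in violations) else "HELD"
def pvStatus (violations : List (List (String × String))) (key : String) : String :=
  if violations.any (fun v => pvGetInvariant v == some key) then "VIOLATED" else "HELD"

def compile_invariant_results_py_alt (violations : List (List (String × String))) :
    List (String × String) :=
  pvInvariantKeys.map (fun k => (k, pvStatus violations k))

-- ===== PRECONDITION & SPEC =====
def Spec_compile_invariant_results_py (violations : List (List (String × String))) (out : List (String × String)) : Prop := out = compile_invariant_results_py_alt violations
instance (violations : List (List (String × String))) (out : List (String × String)) : Decidable (Spec_compile_invariant_results_py violations out) := by unfold Spec_compile_invariant_results_py; infer_instance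

-- ===== CLAIM (what is proved, stated in full; the proofs are below) =====
def Claim_equal_compile_invariant_results_py : Prop := ∀ (violations : List (List (String × String))), Dom_compile_invariant_results_py violations → Spec_compile_invariant_results_py violations (compile_invariant_results_py violations)

-- ===== LEMMAS AND PROOFS =====

-- The loop never adds keys (it only overwrites keys already present).
theorem pv_keys_loop (vs : List (List (String × String))) (d : PySem.Dict String String) :
    (vs.foldl pvStepA d).keys = d.keys := by
  induction vs generalizing d with
  | nil => rfl
  | cons v vs ih =>
    simp only [List.foldl_cons]
    rw [ih]
    unfold pvStepA
    cases pvGetInvariant v with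
    | none => rfl
    | some inv =>
      by_cases h : d.contains inv = true
      · simp [h, PySem.Dict.keys_insert_of_contains]
      · simp [h]

-- Value at a key present from the start: VIOLATED iff some processed violation names it.
theorem pv_getD_loop (vs : List (List (String × String))) (d : PySem.Dict String String)
    (k : String) (hk : d.contains k = true) :
    (vs.foldl pvStepA d).getD k "HELD" =
      if vs.any (fun v => pvGetInvariant v == some k) then "VIOLATED"
      else d.getD k "HELD" := by
  induction vs generalizing d with
  | nil => simp
  | cons v vs ih =>
    cases hv : pvGetInvariant v with
    | none =>
      simp only [List.foldl_cons, List.any_cons, pvStepA, hv]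
      simp [ih d hk]
    | some inv =>
      simp only [List.foldl_cons, List.any_cons, pvStepA, hv]
      by_cases hc : d.contains inv = true
      · simp only [hc, if_true]
        have hk' : (d.insert inv "VIOLATED").contains k = true := by
          rw [PySem.Dict.contains_insert]
          simp [hk]
        rw [ih _ hk', PySem.Dict.getD_insert]
        by_cases hki : k = inv
        · subst hki
          simp
        · have hik : inv ≠ k := fun h => hki (Eq.symm h)
          simp [hki, hik]
      · have hne : inv ≠ k := fun h => hc (h ▸ hk)
        simp [hc, hne, ih d hk]

theorem pv_init_facts (k : String) (hk : k ∈ pvInvariantKeys) :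
    pvInvariantInit.contains k = true ∧ pvInvariantInit.getD k "HELD" = "HELD" := by
  simp only [pvInvariantKeys, List.mem_cons, List.not_mem_nil, or_false] at hk
  rcases hk with h | h | h | h | h | h <;> subst h <;> decide

-- ===== VERDICT (by name: the statement is the Claim_ definition above) =====
theorem compile_invariant_results_py_spec : Claim_equal_compile_invariant_results_py := by
  intro violations _
  show compile_invariant_results_py violations = compile_invariant_results_py_alt violations
  unfold compile_invariant_results_py compile_invariant_results_py_alt
  have hkeys : (violations.foldl pvStepA pvInvariantInit).keys = pvInvariantKeys := by
    rw [pv_keys_loop]; decide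
  have hnd : (violations.foldl pvStepA pvInvariantInit).keys.Nodup := by
    rw [hkeys]; decide
  rw [PySem.Dict.items_eq_map_keys _ hnd "HELD", hkeys]
  apply List.map_congr_left
  intro k hk
  obtain ⟨hc, hd⟩ := pv_init_facts k hk
  rw [pv_getD_loop violations pvInvariantInit k hc, hd]
  rfl
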